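-- pv_equiv track=rewrite | github.com/mandrianova/cs50x | pset6/dna/dna.py | is_target
-- ===== SOURCE A (Python) =====
-- def is_target(dict_str, dna):
--     """if target return true, else false"""
--     str_value = {}
--     for key in dict_str:
--         value = 1
--         while True:  # count the longest str for this key
--             long_str = key * value
--             if long_str in dna:
--                 value += 1
--             else:
--                 break
--         str_value[key] = str(value - 1)
--     if str_value == dict_str:
--         return True
--     return False
-- ===== SOURCE B (Python) =====
-- def is_target(dict_str, dna):
--     """if target return true, else false"""
--     # For each key, find the largest v with key*v in dna by exponential (doubling)
--     # then binary search over v, instead of A's linear upward scan; early-exit on mismatch.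
--     for key, want in dict_str.items():
--         lo, hi = 0, 1
--         while key * hi in dna:      # invariant: key*lo in dna; grow hi until key*hi is not
--             lo, hi = hi, hi * 2
--         while hi - lo > 1:          # binary search: key*lo in dna, key*hi not in dna
--             mid = (lo + hi) // 2
--             if key * mid in dna:
--                 lo = mid
--             else:
--                 hi = mid
--         if str(lo) != want:
--             return False
--     return True
-- ===== Notes on version B (the rewrite author's own statement) =====
-- stated objective: faster
-- what changed: A finds each key's maximal repeat count by a linear upward scan (rebuild key*v and substring-search for v = 1,2,3,...) and then compares a rebuilt dict; B finds it by exponential doubling followed by binary search on v (substring search is monotone in v) and early-exits on the first mismatching key.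
-- outside the precondition, e.g. on is_target({'': '0'}, 'A'): A does not finish within the time limit, B raises OverflowError
import Mathlib
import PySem

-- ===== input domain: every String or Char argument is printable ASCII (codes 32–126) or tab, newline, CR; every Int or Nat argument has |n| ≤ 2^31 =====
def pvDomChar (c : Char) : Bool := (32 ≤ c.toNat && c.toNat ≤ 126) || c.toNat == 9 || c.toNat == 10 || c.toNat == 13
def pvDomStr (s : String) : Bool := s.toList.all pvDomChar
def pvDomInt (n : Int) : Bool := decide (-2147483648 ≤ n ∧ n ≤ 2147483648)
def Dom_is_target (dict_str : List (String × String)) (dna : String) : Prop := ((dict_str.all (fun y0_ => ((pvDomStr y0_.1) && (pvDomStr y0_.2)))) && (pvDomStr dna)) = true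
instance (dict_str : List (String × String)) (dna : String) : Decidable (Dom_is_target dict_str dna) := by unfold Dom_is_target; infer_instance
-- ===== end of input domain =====

-- B replaces A's linear upward scan (rebuild key*v and search for v = 1,2,3,…) by an
-- exponential-then-binary search on v, and early-exits on the first mismatching key.

-- ===== PORT A =====
-- the 'while True' loop of A: value += 1 while (key * value) in dna; fuel = len(dna)+1
-- makes it total (for a nonempty key the loop stops at value ≤ len(dna)+1, so fuel is never exhausted)
def loopA (k s : List Char) : Nat → Int → Int
  | 0, value => value
  | fuel + 1, value =>
      if PySem.Chars.isIn (PySem.List.pyRepeat k value) s then loopA k s fuel (value + 1)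
      else value

def is_target (dict_str : List (String × String)) (dna : String) : Bool :=
  -- str_value = {}; for key in dict_str: … ; str_value[key] = str(value - 1);
  -- 'str_value == dict_str': Python dict equality, exact as items-list equality under Pre_
  -- (both dicts then carry the same keys in the same order)
  (dict_str.foldl
    (fun d kv =>
      d.insert kv.1 (PySem.Int.toStr (loopA kv.1.toList dna.toList (dna.toList.length + 1) 1 - 1)))
    (PySem.Dict.mk [])).items == dict_str

-- ===== PORT B =====
-- 'while key * hi in dna: lo, hi = hi, hi * 2'; fuel = len(dna)+2 makes it total
-- (for a nonempty key, hi doubles past len(dna) within that many steps)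
def dblLoop (k s : List Char) : Nat → Int × Int → Int × Int
  | 0, p => p
  | fuel + 1, (lo, hi) =>
      if PySem.Chars.isIn (PySem.List.pyRepeat k hi) s then dblLoop k s fuel (hi, hi * 2)
      else (lo, hi)

-- 'while hi - lo > 1: mid = (lo + hi) // 2; …'; fuel = len(dna)+2 makes it total
-- (the gap hi - lo halves each step and starts below 2^(len(dna)+2))
def bsLoop (k s : List Char) : Nat → Int → Int → Int
  | 0, lo, _ => lo
  | fuel + 1, lo, hi =>
      if 1 < hi - lo then
        if PySem.Chars.isIn (PySem.List.pyRepeat k (PySem.Int.floordiv (lo + hi) 2)) s then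
          bsLoop k s fuel (PySem.Int.floordiv (lo + hi) 2) hi
        else
          bsLoop k s fuel lo (PySem.Int.floordiv (lo + hi) 2)
      else lo

-- 'for key, want in dict_str.items(): …; if str(lo) != want: return False / return True'
def goB (dict_str : List (String × String)) (dna : String) : Bool :=
  match dict_str with
  | [] => true
  | (key, want) :: rest =>
      let p := dblLoop key.toList dna.toList (dna.toList.length + 2) (0, 1)
      let lo := bsLoop key.toList dna.toList (dna.toList.length + 2) p.1 p.2
      if PySem.Int.toStr lo == want then goB rest dna else false

def is_target_alt (dict_str : List (String × String)) (dna : String) : Bool :=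
  goB dict_str dna

-- ===== PRECONDITION & SPEC =====
-- Pre_ excludes (a) any empty-string key, on which both Pythons loop forever ('' * v is always
-- in dna), and (b) duplicate keys, which cannot occur in A's actual input (a Python dict).
def Pre_is_target (dict_str : List (String × String)) (dna : String) : Prop :=
  (∀ kv ∈ dict_str, kv.1 ≠ "") ∧ (dict_str.map Prod.fst).Nodup
instance (dict_str : List (String × String)) (dna : String) : Decidable (Pre_is_target dict_str dna) := by unfold Pre_is_target; infer_instance

def pvWitness_is_target : (List (String × String)) × String :=
  ([("A", "2")], "AAG")

def Spec_is_target (dict_str : List (String × String)) (dna : String) (out : Bool) : Prop := out = is_target_alt dict_str dna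
instance (dict_str : List (String × String)) (dna : String) (out : Bool) : Decidable (Spec_is_target dict_str dna out) := by unfold Spec_is_target; infer_instance

-- ===== CLAIM (what is proved, stated in full; the proofs are below) =====
def Claim_equal_is_target : Prop := ∀ (dict_str : List (String × String)) (dna : String), Dom_is_target dict_str dna → Pre_is_target dict_str dna → Spec_is_target dict_str dna (is_target dict_str dna)

-- ===== LEMMAS AND PROOFS =====

-- `key * v` for successive v: one more copy of k in front
lemma pyRepeat_succ (k : List Char) (v : Int) (hv : 0 ≤ v) :
    PySem.List.pyRepeat k (v + 1) = k ++ PySem.List.pyRepeat k v := by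
  simp [PySem.List.pyRepeat]
  rw [show (v + 1).toNat = v.toNat + 1 by omega, List.replicate_succ, List.flatten_cons]

lemma pyRepeat_length (k : List Char) (v : Int) :
    (PySem.List.pyRepeat k v).length = v.toNat * k.length := by
  simp [PySem.List.pyRepeat, List.length_flatten]

-- C k s v := "key * v in dna"
def C (k s : List Char) (v : Int) : Bool := PySem.Chars.isIn (PySem.List.pyRepeat k v) s

lemma C_zero (k s : List Char) : C k s 0 = true := by
  simp [C, PySem.List.pyRepeat, PySem.Chars.isIn_nil]

lemma C_mono (k s : List Char) {v w : Int} (hv : 0 ≤ v) (hvw : v ≤ w) (hw : C k s w = true) :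
    C k s v = true := by
  have key : ∀ (u : Int), 0 ≤ u → C k s (u + 1) = true → C k s u = true := by
    intro u hu h
    rw [C, PySem.Chars.isIn_iff_infix] at *
    exact List.IsInfix.trans (by rw [pyRepeat_succ k u hu]; exact (List.suffix_append _ _).isInfix) h
  have : ∀ (d : Nat) (w : Int), 0 ≤ w → C k s (w + d) = true → C k s w = true := by
    intro d
    induction d with
    | zero => simp
    | succ n ih =>
      intro w hw h
      exact key w hw (ih (w + 1) (by omega) (by rwa [show w + 1 + (n : Int) = w + (n + 1 : Nat) by push_cast; ring]))
  have := this (w - v).toNat v hv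
  rw [show v + ((w - v).toNat : Int) = w by omega] at this
  exact this hw

lemma C_big (k s : List Char) (hk : k ≠ []) {v : Int} (hv : (s.length : Int) < v) :
    C k s v = false := by
  by_contra h
  rw [Bool.not_eq_false, C, PySem.Chars.isIn_iff_infix] at h
  have hle := h.length_le
  rw [pyRepeat_length] at hle
  have hk1 : 1 ≤ k.length := List.length_pos_of_ne_nil hk
  nlinarith [Nat.le_mul_of_pos_right v.toNat hk1, show s.length + 1 ≤ v.toNat by omega]

-- characterization shared by both loops
def Post (k s : List Char) (m : Int) : Prop := 0 ≤ m ∧ C k s m = true ∧ C k s (m + 1) = false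

-- A's loop returns m + 1 where Post m
lemma loopA_spec (k s : List Char) (m : Int) (hm : Post k s m) :
    ∀ (fuel : Nat) (value : Int), 1 ≤ value → value ≤ m + 1 → m + 1 ≤ value + fuel →
    loopA k s fuel value = m + 1 := by
  rcases hm with ⟨hm0, hmC, hmF⟩
  intro fuel
  induction fuel with
  | zero => intro value h1 h2 h3; simp only [loopA]; omega
  | succ n ih =>
    intro value h1 h2 h3
    by_cases hv : value = m + 1
    · subst hv
      have hF := hmF; simp only [C] at hF
      simp [loopA, hF]
    · have hCv : C k s value = true := C_mono k s (by omega) (by omega) hmC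
      simp only [loopA, C] at hCv ⊢
      rw [hCv]
      simp only [if_true]
      exact ih (value + 1) (by omega) (by omega) (by omega)

-- C v forces v ≤ len s (key nonempty): contrapositive of C_big
lemma C_le (k s : List Char) (hk : k ≠ []) {v : Int} (hC : C k s v = true) :
    v ≤ (s.length : Int) := by
  by_contra h
  rw [C_big k s hk (by omega)] at hC
  exact absurd hC (by simp)

-- B's doubling loop establishes the binary-search invariant (with a bound on hi)
lemma dblLoop_spec (k s : List Char) (hk : k ≠ []) :
    ∀ (fuel : Nat) (lo hi : Int), 0 ≤ lo → lo < hi → C k s lo = true →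
    (s.length : Int) + 1 ≤ hi + fuel →
    let p := dblLoop k s fuel (lo, hi)
    0 ≤ p.1 ∧ p.1 < p.2 ∧ C k s p.1 = true ∧ C k s p.2 = false ∧
      (p.2 ≤ hi ∨ p.2 ≤ 2 * (s.length : Int)) := by
  intro fuel
  induction fuel with
  | zero =>
    intro lo hi h0 hlh hClo hbound
    simp only [dblLoop]
    exact ⟨h0, hlh, hClo, C_big k s hk (by omega), Or.inl le_rfl⟩
  | succ n ih =>
    intro lo hi h0 hlh hClo hbound
    simp only [dblLoop]
    by_cases hC : C k s hi = true
    · have hhin : hi ≤ (s.length : Int) := C_le k s hk hC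
      have hrec := ih hi (hi * 2) (by omega) (by omega) hC (by omega)
      simp only [C] at hC; rw [hC]; simp only [if_true]
      exact ⟨hrec.1, hrec.2.1, hrec.2.2.1, hrec.2.2.2.1, Or.inr (by rcases hrec.2.2.2.2 with h | h <;> omega)⟩
    · rw [Bool.not_eq_true, C] at hC; rw [hC]
      simp only [Bool.false_eq_true, if_false]
      exact ⟨h0, hlh, hClo, hC, Or.inl le_rfl⟩

-- B's binary search narrows the invariant down to Post (the gap halves, so fuel with
-- hi - lo ≤ 2^fuel suffices)
lemma bsLoop_spec (k s : List Char) :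
    ∀ (fuel : Nat) (lo hi : Int), 0 ≤ lo → lo < hi → C k s lo = true → C k s hi = false →
    (hi - lo).toNat ≤ 2 ^ fuel →
    Post k s (bsLoop k s fuel lo hi) := by
  intro fuel
  induction fuel with
  | zero =>
    intro lo hi h0 hlh hClo hChi hgap
    simp only [pow_zero] at hgap
    have : hi = lo + 1 := by omega
    simp only [bsLoop]
    exact ⟨h0, hClo, by rw [← this]; exact hChi⟩
  | succ n ih =>
    intro lo hi h0 hlh hClo hChi hgap
    simp only [bsLoop]
    by_cases hg : 1 < hi - lo
    · rw [if_pos hg]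
      have hmid : PySem.Int.floordiv (lo + hi) 2 = (lo + hi) / 2 :=
        PySem.Int.floordiv_eq_ediv_of_pos (by norm_num)
      have hpow : (2 : Nat) ^ (n + 1) = 2 * 2 ^ n := by ring
      by_cases hC : C k s (PySem.Int.floordiv (lo + hi) 2) = true
      · simp only [C] at hC; rw [hC]; simp only [if_true]
        exact ih _ _ (by rw [hmid]; omega) (by rw [hmid]; omega) hC hChi (by rw [hmid]; omega)
      · rw [Bool.not_eq_true, C] at hC; rw [hC]; simp only [Bool.false_eq_true, if_false]
        exact ih _ _ h0 (by rw [hmid]; omega) hClo hC (by rw [hmid]; omega)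
    · rw [if_neg hg]
      have : hi = lo + 1 := by omega
      exact ⟨h0, hClo, by rw [← this]; exact hChi⟩

-- per key: A's count and B's count agree (key nonempty)
lemma count_eq (key dna : String) (hk : key ≠ "") :
    loopA key.toList dna.toList (dna.toList.length + 1) 1 - 1 =
      bsLoop key.toList dna.toList (dna.toList.length + 2)
        (dblLoop key.toList dna.toList (dna.toList.length + 2) (0, 1)).1
        (dblLoop key.toList dna.toList (dna.toList.length + 2) (0, 1)).2 := by
  have hkl : key.toList ≠ [] := by simpa using hk
  have hdbl := dblLoop_spec key.toList dna.toList hkl (dna.toList.length + 2) 0 1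
    le_rfl (by omega) (C_zero _ _) (by push_cast; omega)
  obtain ⟨hp0, hplt, hpC, hpF, hpB⟩ := hdbl
  have hgap : ((dblLoop key.toList dna.toList (dna.toList.length + 2) (0, 1)).2 -
      (dblLoop key.toList dna.toList (dna.toList.length + 2) (0, 1)).1).toNat
        ≤ 2 ^ (dna.toList.length + 2) := by
    have h1 : dna.toList.length < 2 ^ dna.toList.length := Nat.lt_two_pow_self
    have h2 : (2 : Nat) ^ (dna.toList.length + 2) = 2 * 2 * 2 ^ dna.toList.length := by ring
    omega
  have hpost := bsLoop_spec key.toList dna.toList _ _ _ hp0 hplt hpC hpF hgap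
  set m := bsLoop key.toList dna.toList (dna.toList.length + 2)
      (dblLoop key.toList dna.toList (dna.toList.length + 2) (0, 1)).1
      (dblLoop key.toList dna.toList (dna.toList.length + 2) (0, 1)).2 with hm
  have hmn : m ≤ (dna.toList.length : Int) := by
    by_contra h
    have hbig := C_big key.toList dna.toList hkl (v := m) (by omega)
    have h1 := hpost.2.1
    rw [hbig] at h1
    exact absurd h1 (by simp)
  have := loopA_spec key.toList dna.toList m hpost (dna.toList.length + 1) 1
    le_rfl (by have := hpost.1; omega) (by push_cast; omega)
  omega

-- A's dict fold over the (Nodup) keys of dict_str, compared with dict_str, is B's early-exit scan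
lemma fold_vs_go (dna : String) (l : List (String × String))
    (hne : ∀ kv ∈ l, kv.1 ≠ "") (hnd : (l.map Prod.fst).Nodup) :
    ((l.map (fun kv => (kv.1, PySem.Int.toStr
        (loopA kv.1.toList dna.toList (dna.toList.length + 1) 1 - 1)))) == l)
      = goB l dna := by
  induction l with
  | nil => simp [goB]
  | cons hd tl ih =>
    obtain ⟨key, want⟩ := hd
    have hkey : key ≠ "" := hne (key, want) (List.mem_cons_self ..)
    have hcount := count_eq key dna hkey
    simp only [List.map_cons, goB]
    rw [← hcount]
    have htl := ih (fun kv h => hne kv (List.mem_cons_of_mem _ h)) (by simp at hnd; exact hnd.2)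
    by_cases hv : PySem.Int.toStr (loopA key.toList dna.toList (dna.toList.length + 1) 1 - 1) == want
    · rw [if_pos hv]
      rw [← htl]
      simp_all
    · rw [if_neg (by simpa using hv)]
      simp at hv
      simp [hv]

theorem is_target_spec_aux (dict_str : List (String × String)) (dna : String)
    (hpre : Pre_is_target dict_str dna) :
    is_target dict_str dna = is_target_alt dict_str dna := by
  obtain ⟨hne, hnd⟩ := hpre
  unfold is_target is_target_alt
  rw [PySem.Dict.items_foldl_insert_fresh dict_str Prod.fst
        (fun kv => PySem.Int.toStr (loopA kv.1.toList dna.toList (dna.toList.length + 1) 1 - 1))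
        (PySem.Dict.mk []) (fun a _ => rfl) hnd]
  simpa using fold_vs_go dna dict_str hne hnd

-- ===== VERDICT (by name: the statement is the Claim_ definition above) =====
theorem is_target_spec : Claim_equal_is_target := by
  intro dict_str dna _ hpre
  exact is_target_spec_aux dict_str dna hpre
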